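-- pv_equiv track=rewrite | github.com/google/gapid | tools/build/third_party/luci-py/appengine/swarming/ts_mon_metrics.py | _extract_job_fields
-- ===== SOURCE A (Python) =====
-- def _extract_job_fields(tags):
--   """Extracts common job's metric fields from TaskResultSummary.
--
--   Args:
--     tags (list of str): list of 'key:value' strings.
--   """
--   tags_dict = {}
--   for tag in tags:
--     try:
--       key, value = tag.split(':', 1)
--       tags_dict[key] = value
--     except ValueError:
--       pass
--
--   spec_name = tags_dict.get('spec_name')
--   if not spec_name:
--     spec_name = '%s:%s' % (
--         tags_dict.get('master', ''),
--         tags_dict.get('buildername', ''))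
--     if tags_dict.get('build_is_experimental') == 'true':
--       spec_name += ':experimental'
--
--   fields = {
--       'project_id': tags_dict.get('project', ''),
--       'subproject_id': tags_dict.get('subproject', ''),
--       'pool': tags_dict.get('pool', ''),
--       'spec_name': spec_name,
--   }
--   return fields
-- ===== SOURCE B (Python) =====
-- def _extract_job_fields(tags):
--   """Extracts common job's metric fields from TaskResultSummary.
--
--   No key->value dict: each needed key is resolved by scanning the tags
--   backwards for the first tag with that 'key:' prefix (= last occurrence).
--   Correct because the looked-up keys contain no ':', so a tag maps to key k
--   under A's split(':', 1) exactly when it starts with 'k:'.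
--   """
--   def _last(key):
--     prefix = key + ':'
--     for tag in reversed(tags):
--       if tag.startswith(prefix):
--         return tag[len(prefix):]
--     return ''
--
--   spec_name = _last('spec_name')
--   if not spec_name:
--     spec_name = '%s:%s' % (_last('master'), _last('buildername'))
--     if _last('build_is_experimental') == 'true':
--       spec_name += ':experimental'
--   return {
--       'project_id': _last('project'),
--       'subproject_id': _last('subproject'),
--       'pool': _last('pool'),
--       'spec_name': spec_name,
--   }
-- ===== Notes on version B (the rewrite author's own statement) =====
-- stated objective: alternative
-- what changed: B drops A's tags_dict build entirely: each needed key is resolved independently by a backwards scan of tags for the first tag with prefix 'key:' (first match from the end = A's last-value-wins), correct because the looked-up keys contain no ':'.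
import Mathlib
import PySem

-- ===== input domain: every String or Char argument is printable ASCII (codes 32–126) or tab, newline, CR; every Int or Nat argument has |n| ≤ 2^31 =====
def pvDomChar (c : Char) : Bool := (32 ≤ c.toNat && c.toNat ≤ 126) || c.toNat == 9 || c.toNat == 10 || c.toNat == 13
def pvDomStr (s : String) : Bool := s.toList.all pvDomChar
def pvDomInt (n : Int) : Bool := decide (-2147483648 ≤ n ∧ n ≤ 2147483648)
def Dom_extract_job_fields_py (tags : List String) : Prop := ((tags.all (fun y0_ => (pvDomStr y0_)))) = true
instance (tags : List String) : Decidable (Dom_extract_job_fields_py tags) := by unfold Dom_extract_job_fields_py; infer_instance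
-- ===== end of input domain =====

-- B replaces A's tags_dict by independent backwards scans of tags, one per needed
-- key, taking the first tag with prefix 'key:' (objective: alternative decomposition).


-- ===== PORT A =====
-- loop body of A: split on ':' (maxsplit 1); a 1-part result is the caught ValueError
def jobStepA (d : PySem.Dict String String) (tag : String) : PySem.Dict String String :=
  match PySem.Str.splitMax? tag ":" 1 with
  | some [key, value] => d.insert key value
  | _ => d

def extract_job_fields_py (tags : List String) : List (String × String) :=
  let tags_dict := tags.foldl jobStepA PySem.Dict.empty
  let built :=
    let b := tags_dict.getD "master" "" ++ ":" ++ tags_dict.getD "buildername" ""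
    if tags_dict.get? "build_is_experimental" = some "true" then b ++ ":experimental" else b
  let spec_name :=
    match tags_dict.get? "spec_name" with
    | some s => if s ≠ "" then s else built
    | none => built
  [("project_id", tags_dict.getD "project" ""),
   ("subproject_id", tags_dict.getD "subproject" ""),
   ("pool", tags_dict.getD "pool" ""),
   ("spec_name", spec_name)]

-- ===== PORT B =====
-- Source B's _last loop over reversed(tags): first tag starting with the prefix wins
def lastFrom (pfx : String) : List String → String
  | [] => ""
  | tag :: rest =>
    if PySem.Str.startswith tag pfx then PySem.Str.slice tag (some (pfx.length : Int)) none
    else lastFrom pfx rest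

def lastTag (key : String) (tags : List String) : String :=
  lastFrom (key ++ ":") tags.reverse

def extract_job_fields_py_alt (tags : List String) : List (String × String) :=
  let spec0 := lastTag "spec_name" tags
  let spec_name :=
    if spec0 = "" then
      let s := lastTag "master" tags ++ ":" ++ lastTag "buildername" tags
      if lastTag "build_is_experimental" tags = "true" then s ++ ":experimental" else s
    else spec0
  [("project_id", lastTag "project" tags),
   ("subproject_id", lastTag "subproject" tags),
   ("pool", lastTag "pool" tags),
   ("spec_name", spec_name)]

-- ===== PRECONDITION & SPEC =====
def Spec_extract_job_fields_py (tags : List String) (out : List (String × String)) : Prop := out = extract_job_fields_py_alt tags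
instance (tags : List String) (out : List (String × String)) : Decidable (Spec_extract_job_fields_py tags out) := by unfold Spec_extract_job_fields_py; infer_instance

-- ===== CLAIM (what is proved, stated in full; the proofs are below) =====
def Claim_equal_extract_job_fields_py : Prop := ∀ (tags : List String), Dom_extract_job_fields_py tags → Spec_extract_job_fields_py tags (extract_job_fields_py tags)

-- ===== LEMMAS AND PROOFS =====

-- splitOnMax.go with budget 0: the whole remainder is the last piece
theorem go_zero (fuel : Nat) (l : List Char) (acc : List (List Char)) :
    PySem.Chars.splitOnMax.go [':'] fuel 0 l [] acc = (l :: acc).reverse := by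
  cases fuel with
  | zero => simp [PySem.Chars.splitOnMax.go]
  | succ f => cases l <;> simp [PySem.Chars.splitOnMax.go]

-- splitOnMax.go with budget 1: split at the first ':' if any
theorem go_one (l : List Char) (fuel : Nat) (cur : List Char) (acc : List (List Char))
    (h : l.length < fuel) :
    PySem.Chars.splitOnMax.go [':'] fuel 1 l cur acc =
      if ':' ∈ l then
        acc.reverse ++ [cur.reverse ++ l.takeWhile (· ≠ ':'), (l.dropWhile (· ≠ ':')).tail]
      else acc.reverse ++ [cur.reverse ++ l] := by
  induction l generalizing fuel cur acc with
  | nil =>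
    cases fuel with
    | zero => omega
    | succ f => simp [PySem.Chars.splitOnMax.go]
  | cons c rest ih =>
    cases fuel with
    | zero => omega
    | succ f =>
      by_cases hc : c = ':'
      · subst hc
        simp only [PySem.Chars.splitOnMax.go, if_neg (by omega : ¬ (1 = 0))]
        simp [go_zero]
      · have hrest : rest.length < f := by simp at h; omega
        simp only [PySem.Chars.splitOnMax.go, if_neg (by omega : ¬ (1 = 0))]
        have hpre : [':'].isPrefixOf (c :: rest) = false := by
          simp [List.isPrefixOf]; exact fun hh => (hc hh.symm).elim
        rw [hpre]
        simp only [Bool.false_eq_true, if_false]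
        rw [ih f (c :: cur) acc hrest]
        have hm : (':' ∈ c :: rest) = (':' ∈ rest) := by
          simp only [List.mem_cons, eq_iff_iff]
          constructor
          · rintro (h | h)
            · exact absurd h.symm hc
            · exact h
          · exact Or.inr
        simp only [hm, List.takeWhile_cons, List.dropWhile_cons, ne_eq, hc,
          decide_not]
        split_ifs <;> simp_all

-- Characterization of tag.split(':', 1) at the char level
theorem splitMax_colon (t : List Char) :
    PySem.Chars.splitMax? t [':'] 1 =
      some (if ':' ∈ t then [t.takeWhile (· ≠ ':'), (t.dropWhile (· ≠ ':')).tail] else [t]) := by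
  unfold PySem.Chars.splitMax? PySem.Chars.splitOnMax
  rw [if_neg (by decide), if_neg (by norm_num), show ((1 : Int).toNat) = 1 from rfl,
    go_one t (t.length + 1) [] [] (by omega)]
  split_ifs <;> simp

-- A's loop body, rewritten via the characterization
theorem jobStepA_eq (d : PySem.Dict String String) (tag : String) :
    jobStepA d tag =
      if ':' ∈ tag.toList then
        d.insert (String.ofList (tag.toList.takeWhile (· ≠ ':')))
                 (String.ofList ((tag.toList.dropWhile (· ≠ ':')).tail))
      else d := by
  unfold jobStepA PySem.Str.splitMax?
  have : (":" : String).toList = [':'] := by decide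
  rw [this, splitMax_colon]
  split_ifs <;> simp

-- if ':' occurs, dropWhile (≠':') starts with ':'
theorem dropWhile_colon (l : List Char) (h : ':' ∈ l) :
    l.dropWhile (· ≠ ':') = ':' :: (l.dropWhile (· ≠ ':')).tail := by
  induction l with
  | nil => cases h
  | cons a l ih =>
    by_cases ha : a = ':'
    · subst ha; simp
    · have hl : ':' ∈ l := by cases h with
        | head => exact (ha rfl).elim
        | tail _ hm => exact hm
      have := ih hl
      simp only [List.dropWhile_cons, ne_eq, ha, decide_not] at this ⊢
      simpa using this

-- takeWhile/dropWhile of k ++ ':' :: r when k has no ':'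
theorem takeWhile_prefix (k r : List Char) (hk : ':' ∉ k) :
    (k ++ ':' :: r).takeWhile (· ≠ ':') = k ∧ (k ++ ':' :: r).dropWhile (· ≠ ':') = ':' :: r := by
  induction k with
  | nil => simp
  | cons a k ih =>
    have ha : a ≠ ':' := fun h => hk (h ▸ List.mem_cons_self)
    have hk' : ':' ∉ k := fun h => hk (List.mem_cons_of_mem _ h)
    obtain ⟨h1, h2⟩ := ih hk'
    simp only [ne_eq, decide_not] at h1 h2 ⊢
    simp_all

-- tag startswith key+':'  ⟺  ':' occurs and the part before the first ':' is key
theorem startswith_char (key tag : String) (hk : ':' ∉ key.toList) :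
    PySem.Str.startswith tag (key ++ ":") = true ↔
      (':' ∈ tag.toList ∧ tag.toList.takeWhile (· ≠ ':') = key.toList) := by
  unfold PySem.Str.startswith
  rw [PySem.Chars.startswith_iff]
  have hcat : (key ++ ":").toList = key.toList ++ [':'] := by simp
  rw [hcat]
  constructor
  · rintro ⟨r, hr⟩
    have ht : tag.toList = key.toList ++ ':' :: r := by rw [← hr]; simp
    obtain ⟨h1, _⟩ := takeWhile_prefix key.toList r hk
    refine ⟨by rw [ht]; simp, ?_⟩
    rw [ht, h1]
  · rintro ⟨hmem, htake⟩
    have hd := dropWhile_colon tag.toList hmem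
    have hsplit : tag.toList = key.toList ++ ':' :: (tag.toList.dropWhile (· ≠ ':')).tail := by
      conv_lhs => rw [← List.takeWhile_append_dropWhile (p := (· ≠ ':')) (l := tag.toList)]
      rw [htake, hd]; simp
    refine ⟨(tag.toList.dropWhile (· ≠ ':')).tail, ?_⟩
    conv_rhs => rw [hsplit]
    simp

-- when tag startswith key+':', B's slice value equals A's inserted value
theorem slice_value (key tag : String) (hk : ':' ∉ key.toList)
    (hs : PySem.Str.startswith tag (key ++ ":") = true) :
    PySem.Str.slice tag (some (((key ++ ":").length : Nat) : Int)) none =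
      String.ofList ((tag.toList.dropWhile (· ≠ ':')).tail) := by
  obtain ⟨hmem, htake⟩ := (startswith_char key tag hk).mp hs
  have hd := dropWhile_colon tag.toList hmem
  have hsplit : tag.toList = key.toList ++ ':' :: (tag.toList.dropWhile (· ≠ ':')).tail := by
    conv_lhs => rw [← List.takeWhile_append_dropWhile (p := (· ≠ ':')) (l := tag.toList)]
    rw [htake, hd]; simp
  unfold PySem.Str.slice
  congr 1
  rw [PySem.Chars.slice_eq_listSlice, PySem.List.slice_from_natCast]
  conv_lhs => rw [hsplit]
  have hlen : (key ++ ":").length = key.toList.length + 1 := by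
    have h1 : (":" : String).length = 1 := by decide
    rw [String.length_append, h1, ← String.length_toList]
  rw [hlen, show (key.toList ++ ':' :: (tag.toList.dropWhile (· ≠ ':')).tail
      = (key.toList ++ [':']) ++ (tag.toList.dropWhile (· ≠ ':')).tail) by simp,
    show key.toList.length + 1 = (key.toList ++ [':']).length by simp,
    List.drop_left]

-- proof-side optional variant of B's scan
def lastFrom? (pfx : String) : List String → Option String
  | [] => none
  | tag :: rest =>
    if PySem.Str.startswith tag pfx then some (PySem.Str.slice tag (some (pfx.length : Int)) none)
    else lastFrom? pfx rest

theorem lastFrom_eq (pfx : String) (l : List String) :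
    lastFrom pfx l = (lastFrom? pfx l).getD "" := by
  induction l with
  | nil => rfl
  | cons t rest ih =>
    simp only [lastFrom, lastFrom?]
    split_ifs <;> simp [ih]

-- the bridge: A's dict lookup = B's reverse scan (for keys without ':')
theorem foldA_getD (key : String) (hk : ':' ∉ key.toList) (tags : List String) :
    ∀ d : PySem.Dict String String,
      (tags.foldl jobStepA d).getD key "" =
        (lastFrom? (key ++ ":") tags.reverse).getD (d.getD key "") := by
  induction tags using List.reverseRecOn with
  | nil => intro d; simp [lastFrom?]
  | append_singleton ts t ih =>
    intro d
    rw [List.foldl_append, List.foldl_cons, List.foldl_nil, List.reverse_append]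
    simp only [List.reverse_singleton, List.singleton_append]
    by_cases hs : PySem.Str.startswith t (key ++ ":") = true
    · obtain ⟨hmem, htake⟩ := (startswith_char key t hk).mp hs
      rw [jobStepA_eq, if_pos hmem, htake]
      simp only [lastFrom?, hs, if_pos]
      rw [PySem.Dict.getD_insert]
      rw [if_pos (by simp), slice_value key t hk hs]
      simp
    · simp only [lastFrom?, hs, Bool.false_eq_true, if_false]
      by_cases hmem : ':' ∈ t.toList
      · rw [jobStepA_eq, if_pos hmem, PySem.Dict.getD_insert]
        have hne : key ≠ String.ofList (t.toList.takeWhile (· ≠ ':')) := by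
          intro he
          apply hs
          refine (startswith_char key t hk).mpr ⟨hmem, ?_⟩
          rw [he]; simp
        rw [if_neg hne, ih d]
      · rw [jobStepA_eq, if_neg hmem, ih d]

theorem lastTag_eq (key : String) (hk : ':' ∉ key.toList) (tags : List String) :
    (tags.foldl jobStepA PySem.Dict.empty).getD key "" = lastTag key tags := by
  rw [lastTag, lastFrom_eq, foldA_getD key hk tags PySem.Dict.empty, PySem.Dict.getD_empty]

-- A's falsy test on get? "spec_name" collapses to a test on getD with default "".
theorem spec_name_match (d : PySem.Dict String String) (b : String) :
    (match d.get? "spec_name" with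
     | some s => if s ≠ "" then s else b
     | none => b) = if d.getD "spec_name" "" = "" then b else d.getD "spec_name" "" := by
  rw [PySem.Dict.getD_eq_get?_getD]
  cases d.get? "spec_name" with
  | none => simp
  | some s => by_cases hs : s = "" <;> simp [hs]

-- get? = some "true"  ↔  getD "" = "true"  (since "true" ≠ "")
theorem exp_match (d : PySem.Dict String String) :
    (d.get? "build_is_experimental" = some "true") ↔ d.getD "build_is_experimental" "" = "true" := by
  rw [PySem.Dict.getD_eq_get?_getD]
  cases d.get? "build_is_experimental" with
  | none => simp
  | some s => simp

-- ===== VERDICT (by name: the statement is the Claim_ definition above) =====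
theorem extract_job_fields_py_spec : Claim_equal_extract_job_fields_py := by
  intro tags _
  unfold Spec_extract_job_fields_py extract_job_fields_py extract_job_fields_py_alt
  have h1 := lastTag_eq "project" (by decide) tags
  have h2 := lastTag_eq "subproject" (by decide) tags
  have h3 := lastTag_eq "pool" (by decide) tags
  have h4 := lastTag_eq "master" (by decide) tags
  have h5 := lastTag_eq "buildername" (by decide) tags
  have h6 := lastTag_eq "spec_name" (by decide) tags
  have h7 := lastTag_eq "build_is_experimental" (by decide) tags
  simp only [spec_name_match, h1, h2, h3, h4, h5, h6]
  by_cases hs : lastTag "spec_name" tags = "" <;>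
    by_cases he : lastTag "build_is_experimental" tags = "true" <;>
      simp [hs, he, exp_match, h7]
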